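-- pv_equiv track=rewrite | github.com/IvayloValkov/Python_Fundamentals | Functions/10_array_manipulator.py | min_odd
-- ===== SOURCE A (Python) =====
-- def min_odd(array):
--     min_int = max(array)
--     index = -1
--
--     for i in range(0, len(array)):
--         if array[i] <= min_int and array[i] % 2 == 1:
--             min_int = array[i]
--             index = i
--
--     return index
-- ===== SOURCE B (Python) =====
-- def min_odd(array):
--     m = min((x for x in array if x % 2 == 1), default=None)
--     if m is None:
--         return -1
--     for i in range(len(array) - 1, -1, -1):
--         if array[i] == m:
--             return i
-- ===== Notes on version B (the rewrite author's own statement) =====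
-- stated objective: alternative
-- what changed: A's single fused scan (running threshold seeded with max(array), updating value+index) is replaced by a two-phase decomposition: first compute the minimum odd value with min(...) over a filtering generator, then a separate backward scan returning the last index holding that value.
import Mathlib
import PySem

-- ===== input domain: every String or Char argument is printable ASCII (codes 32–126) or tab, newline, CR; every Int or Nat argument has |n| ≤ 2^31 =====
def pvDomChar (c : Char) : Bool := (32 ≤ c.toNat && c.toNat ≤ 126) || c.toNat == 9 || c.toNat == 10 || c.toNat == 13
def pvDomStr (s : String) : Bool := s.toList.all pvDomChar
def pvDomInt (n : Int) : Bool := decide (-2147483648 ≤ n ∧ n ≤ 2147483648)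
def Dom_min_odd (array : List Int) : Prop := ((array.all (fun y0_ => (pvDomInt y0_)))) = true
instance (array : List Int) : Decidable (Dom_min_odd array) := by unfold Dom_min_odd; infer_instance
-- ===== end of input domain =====

-- B replaces A's fused threshold-scan by "compute the minimum odd value, then find its last index";
-- the equivalence is about the return value only (neither mutates its argument).

-- ===== PORT A =====
-- for i in range(0, len(array)): indices ported as List.range; array[i] is always in range here (getD default unreachable)
def min_odd (array : List Int) : Int :=
  match PySem.List.max? array (fun y => y) with
  | none => 0  -- unreachable under Pre_min_odd: Python's max(array) raises ValueError on []
  | some m0 =>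
      ((List.range array.length).foldl
        (fun (st : Int × Int) i =>
          let x := array.getD i 0
          if x ≤ st.1 ∧ PySem.Int.mod x 2 = 1 then (x, (i : Int)) else st)
        (m0, -1)).2

-- ===== PORT B =====
-- the backward 'for i in range(len(array)-1, -1, -1)' loop of Source B, recursing on the index bound
def bFind (array : List Int) (m : Int) : Nat → Int
  | 0 => -1
  | n + 1 => if array.getD n 0 = m then (n : Int) else bFind array m n

def min_odd_alt (array : List Int) : Int :=
  match PySem.List.min? (array.filter (fun x => decide (PySem.Int.mod x 2 = 1))) (fun y => y) with
  | none => -1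
  | some m => bFind array m array.length

-- ===== PRECONDITION & SPEC =====
-- Pre_ excludes only the empty list, on which A raises ValueError (max() of an empty sequence)
def Pre_min_odd (array : List Int) : Prop := array ≠ []
instance (array : List Int) : Decidable (Pre_min_odd array) := by unfold Pre_min_odd; infer_instance
def pvWitness_min_odd : List Int := ([3, 2, 5])

def Spec_min_odd (array : List Int) (out : Int) : Prop := out = min_odd_alt array
instance (array : List Int) (out : Int) : Decidable (Spec_min_odd array out) := by unfold Spec_min_odd; infer_instance

-- ===== CLAIM (what is proved, stated in full; the proofs are below) =====
def Claim_equal_min_odd : Prop := ∀ (array : List Int), Dom_min_odd array → Pre_min_odd array → Spec_min_odd array (min_odd array)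

-- ===== LEMMAS AND PROOFS =====

lemma min?_append_singleton (l : List Int) (m x : Int)
    (h : PySem.List.min? l (fun y => y) = some m) :
    PySem.List.min? (l ++ [x]) (fun y => y) = some (min m x) := by
  cases l with
  | nil => simp [PySem.List.min?] at h
  | cons a t =>
      rw [PySem.List.min?_id_cons] at h
      rw [List.cons_append, PySem.List.min?_id_cons, List.foldl_append]
      simp [Option.some.inj h]

lemma bFind_succ (array : List Int) (m : Int) (k : Nat) :
    bFind array m (k + 1) = if array.getD k 0 = m then (k : Int) else bFind array m k := rfl

lemma filter_odd_pos (x : Int) (l : List Int) (h : PySem.Int.mod x 2 = 1) :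
    List.filter (fun y => decide (PySem.Int.mod y 2 = 1)) (x :: l)
      = x :: List.filter (fun y => decide (PySem.Int.mod y 2 = 1)) l := by
  simp only [List.filter_cons]
  rw [if_pos (by exact decide_eq_true h)]

lemma filter_odd_neg (x : Int) (l : List Int) (h : ¬ PySem.Int.mod x 2 = 1) :
    List.filter (fun y => decide (PySem.Int.mod y 2 = 1)) (x :: l)
      = List.filter (fun y => decide (PySem.Int.mod y 2 = 1)) l := by
  simp only [List.filter_cons]
  rw [if_neg (by simpa using h)]

lemma min?_nil_id : PySem.List.min? ([] : List Int) (fun y => y) = none :=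
  (PySem.List.min?_eq_none_iff _ _).mpr rfl

lemma loopInv (array : List Int) (m0 : Int) (hmax : ∀ x ∈ array, x ≤ m0) :
    ∀ n, n ≤ array.length →
    (List.range n).foldl
        (fun (st : Int × Int) i =>
          let x := array.getD i 0
          if x ≤ st.1 ∧ PySem.Int.mod x 2 = 1 then (x, (i : Int)) else st)
        (m0, -1)
      = match PySem.List.min? ((array.take n).filter (fun x => decide (PySem.Int.mod x 2 = 1))) (fun y => y) with
        | none => (m0, -1)
        | some m => (m, bFind array m n) := by
  intro n hn
  induction n with
  | zero => simpa using min?_nil_id.symm ▸ rfl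
  | succ k ih =>
      have hk : k < array.length := hn
      have ihk := ih (Nat.le_of_lt hk)
      have hget : array.getD k 0 = array[k] := List.getD_eq_getElem array 0 hk
      have htake : array.take (k+1) = array.take k ++ [array[k]] := by
        rw [List.take_add_one]
        simp [List.getElem?_eq_getElem hk]
      have hbf : ∀ m : Int, bFind array m (k+1) = if array[k] = m then (k : Int) else bFind array m k := by
        intro m; rw [bFind_succ, hget]
      rw [List.range_succ, List.foldl_append, ihk]
      cases hmin : PySem.List.min? ((array.take k).filter (fun x => decide (PySem.Int.mod x 2 = 1))) (fun y => y) with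
      | none =>
          have hfe : (array.take k).filter (fun x => decide (PySem.Int.mod x 2 = 1)) = [] :=
            (PySem.List.min?_eq_none_iff _ _).mp hmin
          by_cases hodd : PySem.Int.mod (array[k]) 2 = 1
          · have hle : array[k] ≤ m0 := hmax _ (array.getElem_mem hk)
            simp only [List.foldl_cons, List.foldl_nil, hget]
            rw [if_pos ⟨hle, hodd⟩, htake, List.filter_append, hfe, List.nil_append,
              filter_odd_pos _ _ hodd, List.filter_nil,
              PySem.List.min?_id_cons, List.foldl_nil]
            show (array[k], (k : Int)) = (array[k], bFind array array[k] (k + 1))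
            rw [hbf, if_pos rfl]
          · simp only [List.foldl_cons, List.foldl_nil, hget]
            rw [if_neg (fun h => hodd h.2), htake, List.filter_append, hfe, List.nil_append,
              filter_odd_neg _ _ hodd, List.filter_nil, min?_nil_id]
      | some m =>
          have hmmem := PySem.List.min?_mem hmin
          have hmodd : PySem.Int.mod m 2 = 1 := of_decide_eq_true (List.mem_filter.mp hmmem).2
          by_cases hodd : PySem.Int.mod (array[k]) 2 = 1
          · have hfil : (array.take (k+1)).filter (fun x => decide (PySem.Int.mod x 2 = 1))
                = (array.take k).filter (fun x => decide (PySem.Int.mod x 2 = 1)) ++ [array[k]] := by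
              rw [htake, List.filter_append, filter_odd_pos _ _ hodd, List.filter_nil]
            by_cases hle : array[k] ≤ m
            · simp only [List.foldl_cons, List.foldl_nil, hget]
              rw [if_pos ⟨hle, hodd⟩, hfil, min?_append_singleton _ _ _ hmin, min_eq_right hle]
              show (array[k], (k : Int)) = (array[k], bFind array array[k] (k + 1))
              rw [hbf, if_pos rfl]
            · have hne : array[k] ≠ m := fun h => hle (le_of_eq h)
              simp only [List.foldl_cons, List.foldl_nil, hget]
              rw [if_neg (fun h => hle h.1), hfil, min?_append_singleton _ _ _ hmin,
                min_eq_left (le_of_lt (lt_of_not_ge hle))]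
              show (m, bFind array m k) = (m, bFind array m (k + 1))
              rw [hbf, if_neg hne]
          · have hne : array[k] ≠ m := fun h => hodd (h ▸ hmodd)
            have hfil : (array.take (k+1)).filter (fun x => decide (PySem.Int.mod x 2 = 1))
                = (array.take k).filter (fun x => decide (PySem.Int.mod x 2 = 1)) := by
              rw [htake, List.filter_append, filter_odd_neg _ _ hodd, List.filter_nil,
                List.append_nil]
            simp only [List.foldl_cons, List.foldl_nil, hget]
            rw [if_neg (fun h => hodd h.2), hfil, hmin]
            show (m, bFind array m k) = (m, bFind array m (k + 1))
            rw [hbf, if_neg hne]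

-- ===== VERDICT (by name: the statement is the Claim_ definition above) =====
theorem min_odd_spec : Claim_equal_min_odd := by
  intro array _ hpre
  unfold Spec_min_odd min_odd min_odd_alt
  cases hmax : PySem.List.max? array (fun y => y) with
  | none => exact absurd ((PySem.List.max?_eq_none_iff _ _).mp hmax) hpre
  | some m0 =>
      have hbound : ∀ x ∈ array, x ≤ m0 := PySem.List.max?_isMax hmax
      simp only []
      rw [loopInv array m0 hbound array.length (le_refl _), List.take_length]
      cases hmin : PySem.List.min? (array.filter (fun x => decide (PySem.Int.mod x 2 = 1))) (fun y => y) <;> simp
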